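-- pv_equiv track=rewrite | github.com/Jhouny/Minecraft_fishingBot | fishingBot_minecraft_v3.py | Score_inSum
-- ===== SOURCE A (Python) =====
-- def Score_inSum(c, target_index):
--     color = list(c)
--     s0 = color[target_index]*len(color)
--     color.pop(target_index)
--
--     sumRest = 0
--     for ind in range(len(color)):
--         sumRest += color[ind]
--
--     return (s0-sumRest)
-- ===== SOURCE B (Python) =====
-- def Score_inSum(c, target_index):
--     color = list(c)
--     return color[target_index] * (len(color) + 1) - sum(color)
-- ===== Notes on version B (the rewrite author's own statement) =====
-- stated objective: simpler
-- what changed: Replaced the pop() plus explicit index-summation loop with a single closed-form expression: target*(n+1) - sum(color), using the identity sum-of-rest = sum - target.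
import Mathlib
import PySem

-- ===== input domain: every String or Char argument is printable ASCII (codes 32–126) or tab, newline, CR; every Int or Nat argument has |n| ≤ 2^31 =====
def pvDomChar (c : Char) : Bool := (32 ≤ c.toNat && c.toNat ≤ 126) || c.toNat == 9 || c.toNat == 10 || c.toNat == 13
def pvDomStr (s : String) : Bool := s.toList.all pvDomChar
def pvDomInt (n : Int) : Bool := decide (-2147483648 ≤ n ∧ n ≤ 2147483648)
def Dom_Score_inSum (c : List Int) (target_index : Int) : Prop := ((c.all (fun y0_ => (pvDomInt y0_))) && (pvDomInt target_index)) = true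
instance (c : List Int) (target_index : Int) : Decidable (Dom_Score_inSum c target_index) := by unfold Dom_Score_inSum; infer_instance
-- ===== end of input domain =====

-- ===== PORT A =====
-- literal port of A: color[target_index]*len(color); pop(target_index); loop summing the rest
def Score_inSum (c : List Int) (target_index : Int) : Int :=
  let color := c
  match PySem.List.pyGet? color target_index with
  | none => 0  -- IndexError, excluded by Pre_
  | some t =>
    let s0 := t * (color.length : Int)
    match PySem.List.pop? color target_index with
    | none => 0  -- IndexError, excluded by Pre_
    | some (_, rest) =>
      let sumRest := (PySem.List.pyRange 0 (rest.length : Int) 1).foldl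
        (fun acc ind => acc + PySem.List.pyGetD rest ind 0) 0
      s0 - sumRest

-- ===== PORT B =====
-- one honest line: B replaces the pop and summation loop by the closed form target*(n+1) - sum(color)
def Score_inSum_alt (c : List Int) (target_index : Int) : Int :=
  let color := c
  match PySem.List.pyGet? color target_index with
  | none => 0  -- IndexError, excluded by Pre_
  | some t => t * ((color.length : Int) + 1) - color.sum

-- ===== PRECONDITION & SPEC =====
-- Pre_ excludes exactly the inputs where Python raises IndexError (target_index out of range)
def Pre_Score_inSum (c : List Int) (target_index : Int) : Prop :=
  PySem.Raise.InRange c.length target_index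
instance (c : List Int) (target_index : Int) : Decidable (Pre_Score_inSum c target_index) := by
  unfold Pre_Score_inSum; infer_instance
def pvWitness_Score_inSum : List Int × Int := ([3, 1, 4], 1)
def Spec_Score_inSum (c : List Int) (target_index : Int) (out : Int) : Prop := out = Score_inSum_alt c target_index
instance (c : List Int) (target_index : Int) (out : Int) : Decidable (Spec_Score_inSum c target_index out) := by unfold Spec_Score_inSum; infer_instance

-- ===== CLAIM (what is proved, stated in full; the proofs are below) =====
def Claim_equal_Score_inSum : Prop := ∀ (c : List Int) (target_index : Int), Dom_Score_inSum c target_index → Pre_Score_inSum c target_index → Spec_Score_inSum c target_index (Score_inSum c target_index)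

-- ===== LEMMAS AND PROOFS =====

theorem sum_eraseIdx_add (xs : List Int) (n : Nat) (h : n < xs.length) :
    (xs.eraseIdx n).sum + xs[n] = xs.sum := by
  induction xs generalizing n with
  | nil => simp at h
  | cons x xs ih =>
    cases n with
    | zero => simp [List.eraseIdx]; ring
    | succ m =>
      simp only [List.eraseIdx, List.sum_cons, List.getElem_cons_succ]
      have := ih m (by simpa using h)
      omega

theorem pyIdx?_of_inRange (n : Nat) (i : Int) (h : PySem.Raise.InRange n i) :
    ∃ k, k < n ∧ PySem.List.pyIdx? n i = some k := by
  simp only [PySem.Raise.InRange] at h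
  unfold PySem.List.pyIdx?
  split_ifs with h1 h2 h3
  · exact ⟨i.toNat, by omega, rfl⟩
  · omega
  · exact ⟨n - (-i).toNat, by omega, rfl⟩
  · omega

theorem Score_inSum_eq (l : List Int) (ti : Int) (h : PySem.Raise.InRange l.length ti) :
    Score_inSum l ti = Score_inSum_alt l ti := by
  obtain ⟨k, hk, hidx⟩ := pyIdx?_of_inRange l.length ti h
  have hget : PySem.List.pyGet? l ti = some (l[k]'hk) := by
    simp [PySem.List.pyGet?, hidx, List.getElem?_eq_getElem hk]
  have hpop : PySem.List.pop? l ti = some (l[k]'hk, l.eraseIdx k) := by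
    simp [PySem.List.pop?, hidx, List.getElem?_eq_getElem hk]
  simp only [Score_inSum, Score_inSum_alt, hget, hpop]
  rw [PySem.List.foldl_pyRange_zero_pyGetD' (l.eraseIdx k) 0 (fun acc x => acc + x) 0]
  have hsum : (l.eraseIdx k).foldl (fun acc x => acc + x) 0 = (l.eraseIdx k).sum :=
    (List.sum_eq_foldl).symm
  have hlen : (l.eraseIdx k).length = l.length - 1 := List.length_eraseIdx_of_lt hk
  have hers := sum_eraseIdx_add l k hk
  rw [hsum]
  linear_combination -hers

-- ===== VERDICT (by name: the statement is the Claim_ definition above) =====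
theorem Score_inSum_spec : Claim_equal_Score_inSum := by
  intro c ti _ hpre
  exact Score_inSum_eq c ti hpre
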